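-- pv_equiv track=rewrite | github.com/LiuYangyangSDU/BINDER | BINDER.py | getStartAndEndIndex
-- ===== SOURCE A (Python) =====
-- def getStartAndEndIndex(tri_list):
--     start_index, end_index = 0, -1
--     for k in range(len(tri_list)):
--         if len(tri_list[k]) > 2:
--             start_index = k
--             break
--     tri_list_reverse = tri_list[::-1]
--     for j in range(len(tri_list)):
--         if len(tri_list_reverse[j]) > 2:
--             end_index = len(tri_list) - j - 1
--             break
--     return start_index, end_index
-- ===== SOURCE B (Python) =====
-- def getStartAndEndIndex(tri_list):
--     idxs = [k for k, t in enumerate(tri_list) if len(t) > 2]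
--     return (idxs[0] if idxs else 0, idxs[-1] if idxs else -1)
-- ===== Notes on version B (the rewrite author's own statement) =====
-- stated objective: simpler
-- what changed: Replaces A's two scans (a forward break loop plus a reversed-copy break loop with index arithmetic) by building the list of matching indices once and selecting its first/last element, with the same asymmetric defaults 0 and -1.
import Mathlib
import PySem

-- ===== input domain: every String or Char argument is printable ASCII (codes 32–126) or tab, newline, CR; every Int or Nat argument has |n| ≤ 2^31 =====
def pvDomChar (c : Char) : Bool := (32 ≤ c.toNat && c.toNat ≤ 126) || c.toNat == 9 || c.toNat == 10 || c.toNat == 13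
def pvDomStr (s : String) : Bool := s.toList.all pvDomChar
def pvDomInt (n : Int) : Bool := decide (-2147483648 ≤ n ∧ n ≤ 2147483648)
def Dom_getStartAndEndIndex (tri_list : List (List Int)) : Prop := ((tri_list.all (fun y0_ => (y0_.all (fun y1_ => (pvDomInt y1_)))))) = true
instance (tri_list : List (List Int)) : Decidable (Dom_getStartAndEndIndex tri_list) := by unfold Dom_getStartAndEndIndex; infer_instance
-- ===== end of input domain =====

-- B replaces A's two break-loops (forward, and over a reversed copy) by one index-list build plus first/last selection; objective: simpler.
-- ===== PORT A =====
-- first loop of A: scan with running index k, break (return k) on first len>2, else keep default 0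
def pvFindStartA : List (List Int) → Int → Int
  | [], _ => 0
  | x :: xs, k => if x.length > 2 then k else pvFindStartA xs (k + 1)

-- second loop of A: scan the reversed list with running index j, break returning n - j - 1, else default -1
def pvFindEndA (n : Int) : List (List Int) → Int → Int
  | [], _ => -1
  | x :: xs, j => if x.length > 2 then n - j - 1 else pvFindEndA n xs (j + 1)

def getStartAndEndIndex (tri_list : List (List Int)) : Int × Int :=
  (pvFindStartA tri_list 0,
   pvFindEndA (tri_list.length : Int) tri_list.reverse 0)  -- tri_list[::-1] = .reverse

-- ===== PORT B =====
-- the comprehension [k for k, t in enumerate(tri_list) if len(t) > 2]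
def pvCollectIdx : List (List Int) → Int → List Int
  | [], _ => []
  | x :: xs, k => if x.length > 2 then k :: pvCollectIdx xs (k + 1) else pvCollectIdx xs (k + 1)

def getStartAndEndIndex_alt (tri_list : List (List Int)) : Int × Int :=
  let idxs := pvCollectIdx tri_list 0
  (idxs.headD 0, idxs.getLastD (-1))

-- ===== PRECONDITION & SPEC =====
def Spec_getStartAndEndIndex (tri_list : List (List Int)) (out : Int × Int) : Prop := out = getStartAndEndIndex_alt tri_list
instance (tri_list : List (List Int)) (out : Int × Int) : Decidable (Spec_getStartAndEndIndex tri_list out) := by unfold Spec_getStartAndEndIndex; infer_instance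

-- ===== CLAIM (what is proved, stated in full; the proofs are below) =====
def Claim_equal_getStartAndEndIndex : Prop := ∀ (tri_list : List (List Int)), Dom_getStartAndEndIndex tri_list → Spec_getStartAndEndIndex tri_list (getStartAndEndIndex tri_list)

-- ===== LEMMAS AND PROOFS =====

-- ===== VERDICT (by name: the statement is the Claim_ definition above) =====
theorem pvCollectIdx_append (a b : List (List Int)) (c : Int) :
    pvCollectIdx (a ++ b) c = pvCollectIdx a c ++ pvCollectIdx b (c + a.length) := by
  induction a generalizing c with
  | nil => simp [pvCollectIdx]
  | cons x xs ih =>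
      simp only [List.cons_append, pvCollectIdx, ih, List.length_cons]
      have h : c + 1 + (xs.length : Int) = c + ((xs.length : Int) + 1) := by ring
      push_cast
      rw [h]
      split <;> simp

theorem pvFindStartA_eq (l : List (List Int)) (k : Int) :
    pvFindStartA l k = (pvCollectIdx l k).headD 0 := by
  induction l generalizing k with
  | nil => rfl
  | cons x xs ih =>
      simp only [pvFindStartA, pvCollectIdx]
      split <;> simp [ih]

theorem pvFindEndA_shift (l : List (List Int)) (n j d : Int) :
    pvFindEndA n l j = pvFindEndA (n + d) l (j + d) := by
  induction l generalizing j with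
  | nil => rfl
  | cons x xs ih =>
      simp only [pvFindEndA]
      split
      · ring_nf
      · have := ih (j + 1)
        rw [this]
        ring_nf

theorem pvFindEndA_eq (l : List (List Int)) (c : Int) :
    pvFindEndA ((l.length : Int) + c) l.reverse 0 = (pvCollectIdx l c).getLastD (-1) := by
  induction l using List.reverseRecOn generalizing c with
  | nil => rfl
  | append_singleton ys y ih =>
      rw [pvCollectIdx_append]
      simp only [List.reverse_append, List.reverse_cons, List.reverse_nil, List.nil_append,
        List.cons_append, pvFindEndA, pvCollectIdx, List.length_append, List.length_cons,
        List.length_nil]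
      split
      · push_cast
        simp
        ring
      · simp only [List.append_nil]
        have hs := pvFindEndA_shift ys.reverse ((ys.length : Int) + c) 0 1
        rw [show ((ys.length + (0 + 1) : Nat) : Int) + c = (ys.length : Int) + c + 1 by
              push_cast; ring, ← hs, ih c]

theorem getStartAndEndIndex_spec : Claim_equal_getStartAndEndIndex := by
  intro l _
  unfold Spec_getStartAndEndIndex getStartAndEndIndex getStartAndEndIndex_alt
  have h1 := pvFindStartA_eq l 0
  have h2 := pvFindEndA_eq l 0
  rw [add_zero] at h2
  simp [h1, h2]
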